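-- pv_equiv track=rewrite | github.com/divyanshchahar/Consumer-Response-Prediction | ML-Project.py | weekproces
-- ===== SOURCE A (Python) =====
-- def weekproces(y_values, dayweek):
--     dayweek_arranged = ["Monday", "Tuesday", "Wednesday", "Thursday", "Friday", "Saturday", "Sunday"]
--
--     dayweek_ordered = []
--     numdays = []
--     for member in dayweek_arranged:
--         for i in range(0,7):
--             if dayweek[i] == member:
--                 dayweek_ordered.append(dayweek[i])
--                 numdays.append(y_values[i])
--
--     return(numdays, dayweek_ordered)
-- ===== SOURCE B (Python) =====
-- def weekproces(y_values, dayweek):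
--     week = ["Monday", "Tuesday", "Wednesday", "Thursday", "Friday", "Saturday", "Sunday"]
--
--     buckets = [[] for _ in week]
--     for i in range(7):
--         day = dayweek[i]
--         if day in week:
--             buckets[week.index(day)].append(y_values[i])
--
--     numdays = []
--     dayweek_ordered = []
--     for k, b in enumerate(buckets):
--         numdays += b
--         dayweek_ordered += [week[k]] * len(b)
--
--     return (numdays, dayweek_ordered)
-- ===== Notes on version B (the rewrite author's own statement) =====
-- stated objective: alternative
-- what changed: B makes one pass over the first 7 days, filing each y-value into a bucket at its day's canonical Monday-Sunday position, then flattens the seven buckets in order, replacing A's seven repeated index scans (one per weekday name); Pre_ excludes only the inputs on which both versions raise IndexError (fewer than 7 day names, or a weekday name at an index y_values does not reach).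
import Mathlib
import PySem

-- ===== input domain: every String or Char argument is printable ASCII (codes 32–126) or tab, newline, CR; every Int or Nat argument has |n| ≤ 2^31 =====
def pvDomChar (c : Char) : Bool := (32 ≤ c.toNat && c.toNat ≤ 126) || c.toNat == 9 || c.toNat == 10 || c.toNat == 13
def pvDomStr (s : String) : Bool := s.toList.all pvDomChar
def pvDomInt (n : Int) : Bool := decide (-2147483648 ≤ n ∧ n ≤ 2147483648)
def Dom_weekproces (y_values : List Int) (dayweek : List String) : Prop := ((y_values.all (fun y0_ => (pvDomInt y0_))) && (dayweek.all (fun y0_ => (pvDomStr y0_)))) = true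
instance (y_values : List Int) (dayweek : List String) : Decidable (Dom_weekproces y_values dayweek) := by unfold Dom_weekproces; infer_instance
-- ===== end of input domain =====

-- B replaces A's seven repeated index scans by one bucketing pass (values filed under their day's
-- canonical position) plus a flattening of the seven buckets (alternative decomposition, same cost).

-- ===== PORT A =====
def pvWeekA : List String := ["Monday", "Tuesday", "Wednesday", "Thursday", "Friday", "Saturday", "Sunday"]

def weekproces (y_values : List Int) (dayweek : List String) : List Int × List String :=
  -- acc = (dayweek_ordered, numdays); pyGetD defaults are never read inside Pre_ (all indices in range there)
  let r := pvWeekA.foldl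
    (fun (acc : List String × List Int) member =>
      (PySem.List.pyRange 0 7 1).foldl
        (fun (acc : List String × List Int) i =>
          if PySem.List.pyGetD dayweek i "" == member then
            (acc.1 ++ [PySem.List.pyGetD dayweek i ""], acc.2 ++ [PySem.List.pyGetD y_values i 0])
          else acc) acc)
    ([], [])
  (r.2, r.1)

-- ===== PORT B =====
def pvWeekB : List String := ["Monday", "Tuesday", "Wednesday", "Thursday", "Friday", "Saturday", "Sunday"]

def weekproces_alt (y_values : List Int) (dayweek : List String) : List Int × List String :=
  -- buckets[k] collects the y-values of the k-th canonical day; pyGetD/pySetD defaults are never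
  -- read inside Pre_ (all indices in range there, and week.index is guarded by the membership test)
  let buckets : List (List Int) := pvWeekB.map (fun _ => ([] : List Int))
  let buckets := (PySem.List.pyRange 0 7 1).foldl
    (fun (bk : List (List Int)) i =>
      let day := PySem.List.pyGetD dayweek i ""
      if pvWeekB.contains day then
        let k : Int := (((PySem.List.index? pvWeekB day).getD 0 : Nat) : Int)
        PySem.List.pySetD bk k (PySem.List.pyGetD bk k [] ++ [PySem.List.pyGetD y_values i 0])
      else bk) buckets
  (PySem.List.enumerate buckets).foldl
    (fun (acc : List Int × List String) p =>
      (acc.1 ++ p.2, acc.2 ++ PySem.List.pyRepeat [PySem.List.pyGetD pvWeekB p.1 ""] (p.2.length : Int)))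
    ([], [])

-- ===== PRECONDITION & SPEC =====
-- Pre_ is exactly the non-raising domain of both versions: dayweek must have at least 7 entries, and
-- any of the first 7 entries that is a weekday name must have its index inside y_values (else IndexError).
def Pre_weekproces (y_values : List Int) (dayweek : List String) : Prop :=
  7 ≤ dayweek.length ∧ ∀ i : Nat, i < 7 → dayweek.getD i "" ∈ pvWeekA → i < y_values.length
instance (y_values : List Int) (dayweek : List String) : Decidable (Pre_weekproces y_values dayweek) := by unfold Pre_weekproces; infer_instance

def pvWitness_weekproces : List Int × List String :=
  ([3, 1, 4, 1, 5, 9, 2], ["Sunday", "Tuesday", "Monday", "Thursday", "Friday", "Saturday", "Wednesday"])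

def Spec_weekproces (y_values : List Int) (dayweek : List String) (out : List Int × List String) : Prop := out = weekproces_alt y_values dayweek
instance (y_values : List Int) (dayweek : List String) (out : List Int × List String) : Decidable (Spec_weekproces y_values dayweek out) := by unfold Spec_weekproces; infer_instance

-- ===== CLAIM (what is proved, stated in full; the proofs are below) =====
def Claim_equal_weekproces : Prop := ∀ (y_values : List Int) (dayweek : List String), Dom_weekproces y_values dayweek → Pre_weekproces y_values dayweek → Spec_weekproces y_values dayweek (weekproces y_values dayweek)

-- ===== LEMMAS AND PROOFS =====

-- the (day, value) pairs both programs effectively traverse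
def pvPairs (y_values : List Int) (dayweek : List String) : List (String × Int) :=
  (dayweek.take 7).zip y_values

lemma pvPairFold {α β γ : Type} (ms : List α) (f : α → List β) (g : α → List γ) :
    ∀ acc : List β × List γ,
      ms.foldl (fun acc m => (acc.1 ++ f m, acc.2 ++ g m)) acc
        = (acc.1 ++ ms.flatMap f, acc.2 ++ ms.flatMap g) := by
  induction ms with
  | nil => intro acc; simp
  | cons m t ih => intro acc; simp [List.foldl_cons, ih]

lemma pvFilterFstReplicate (l : List (String × Int)) (m : String) :
    (l.filter (fun p => p.1 == m)).map Prod.fst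
      = List.replicate (l.filter (fun p => p.1 == m)).length m := by
  induction l with
  | nil => simp
  | cons p t ih =>
    by_cases h : p.1 = m
    · simp [h, List.replicate_succ, ih]
    · simp [h, ih]

lemma pvInnerA (y_values : List Int) (dayweek : List String)
    (hp : Pre_weekproces y_values dayweek) (member : String) (hm : member ∈ pvWeekA) :
    ∀ (n : Nat), n ≤ 7 → ∀ (acc : List String × List Int),
      (PySem.List.pyRange 0 (n : Int) 1).foldl
        (fun (acc : List String × List Int) i =>
          if PySem.List.pyGetD dayweek i "" == member then
            (acc.1 ++ [PySem.List.pyGetD dayweek i ""], acc.2 ++ [PySem.List.pyGetD y_values i 0])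
          else acc) acc
      = (acc.1 ++ (((pvPairs y_values dayweek).take n).filter (fun p => p.1 == member)).map Prod.fst,
         acc.2 ++ (((pvPairs y_values dayweek).take n).filter (fun p => p.1 == member)).map Prod.snd) := by
  intro n
  induction n with
  | zero =>
      intro _ acc
      simp [PySem.List.pyRange_one_eq_nil (by norm_num : (0:Int) ≤ 0)]
  | succ n ih =>
      intro hn acc
      have hcast : ((n + 1 : Nat) : Int) = (n : Int) + 1 := by push_cast; ring
      rw [hcast, PySem.List.pyRange_one_succ_right (by exact_mod_cast Nat.zero_le n),
          List.foldl_append, ih (by omega)]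
      have hd : n < dayweek.length := by
        have := hp.1; omega
      have hgd : dayweek[n]?.getD "" = dayweek[n] := by rw [List.getElem?_eq_getElem hd]; rfl
      simp only [List.foldl_cons, List.foldl_nil, PySem.List.pyGetD_natCast]
      by_cases hy : n < y_values.length
      · have hlen : n < (pvPairs y_values dayweek).length := by
          simp [pvPairs, List.length_zip, List.length_take]; omega
        have htake : (pvPairs y_values dayweek).take (n + 1)
            = (pvPairs y_values dayweek).take n ++ [(dayweek[n], y_values[n])] := by
          rw [List.take_add_one, List.getElem?_eq_getElem hlen]
          congr 1
          simp [pvPairs, List.getElem_zip, List.getElem_take]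
        rw [htake, List.filter_append]
        have hgy : y_values[n]?.getD 0 = y_values[n] := by rw [List.getElem?_eq_getElem hy]; rfl
        by_cases hmatch : dayweek[n] = member
        · simp [hgd, hgy, hmatch]
        · simp [hgd, hmatch]
      · have hnot : dayweek.getD n "" ∉ pvWeekA := fun h => hy (hp.2 n (by omega) h)
        have hne : dayweek[n]?.getD "" ≠ member := by
          rw [hgd]
          intro h
          exact hnot (by rw [List.getD_eq_getElem dayweek "" hd, h]; exact hm)
        have htake : (pvPairs y_values dayweek).take (n + 1) = (pvPairs y_values dayweek).take n := by
          rw [List.take_add_one, List.getElem?_eq_none]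
          · simp
          · simp [pvPairs, List.length_zip]; omega
        simp [htake, hne]

-- B's bucket for slot k after processing the first n indices
def pvBucket (y_values : List Int) (dayweek : List String) (n k : Nat) : List Int :=
  (((pvPairs y_values dayweek).take n).filter (fun p => p.1 == pvWeekB.getD k "")).map Prod.snd

lemma pvSetMapRange {α : Type} (m : Nat) (f : Nat → α) (k0 : Nat) (hk : k0 < m) (v : α) :
    ((List.range m).map f).set k0 v = (List.range m).map (fun k => if k = k0 then v else f k) := by
  apply List.ext_getElem
  · simp
  · intro i h1 h2
    simp only [List.getElem_set, List.getElem_map, List.getElem_range]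
    rcases eq_or_ne i k0 with h | h
    · subst h; simp
    · simp [h, Ne.symm h]

lemma pvInnerB (y_values : List Int) (dayweek : List String)
    (hp : Pre_weekproces y_values dayweek) :
    ∀ (n : Nat), n ≤ 7 →
      (PySem.List.pyRange 0 (n : Int) 1).foldl
        (fun (bk : List (List Int)) i =>
          let day := PySem.List.pyGetD dayweek i ""
          if pvWeekB.contains day then
            let k : Int := (((PySem.List.index? pvWeekB day).getD 0 : Nat) : Int)
            PySem.List.pySetD bk k (PySem.List.pyGetD bk k [] ++ [PySem.List.pyGetD y_values i 0])
          else bk)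
        (pvWeekB.map (fun _ => ([] : List Int)))
      = (List.range 7).map (pvBucket y_values dayweek n) := by
  intro n
  induction n with
  | zero =>
      intro _
      rfl
  | succ n ih =>
      intro hn
      have hcast : ((n + 1 : Nat) : Int) = (n : Int) + 1 := by push_cast; ring
      rw [hcast, PySem.List.pyRange_one_succ_right (by exact_mod_cast Nat.zero_le n),
          List.foldl_append, ih (by omega)]
      have hd : n < dayweek.length := by
        have := hp.1; omega
      have hgd : dayweek.getD n "" = dayweek[n] := List.getD_eq_getElem dayweek "" hd
      simp only [List.foldl_cons, List.foldl_nil, PySem.List.pyGetD_natCast, hgd]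
      by_cases hmem : dayweek[n] ∈ pvWeekB
      · -- the day is a weekday: Pre_ puts its index inside y_values and the pair lands in bucket k0
        have hy : n < y_values.length := by
          apply hp.2 n (by omega)
          rw [hgd]
          exact hmem
        have hgy : y_values.getD n 0 = y_values[n] := List.getD_eq_getElem y_values 0 hy
        obtain ⟨k0, hk0⟩ := Option.isSome_iff_exists.mp
          ((PySem.List.index?_isSome_iff pvWeekB dayweek[n]).mpr hmem)
        obtain ⟨hk0lt, hk0get, _⟩ := PySem.List.getElem_of_index?_eq_some hk0
        have hk07 : k0 < 7 := by simpa [pvWeekB] using hk0lt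
        have hlen : n < (pvPairs y_values dayweek).length := by
          simp [pvPairs, List.length_zip, List.length_take]; omega
        have htake : (pvPairs y_values dayweek).take (n + 1)
            = (pvPairs y_values dayweek).take n ++ [(dayweek[n], y_values[n])] := by
          rw [List.take_add_one, List.getElem?_eq_getElem hlen]
          congr 1
          simp [pvPairs, List.getElem_zip, List.getElem_take]
        have hcontains : pvWeekB.contains dayweek[n] = true := by simp [hmem]
        simp only [hcontains, if_pos, hk0, Option.getD_some, hgy,
          PySem.List.pySetD_natCast]
        rw [List.getD_eq_getElem _ _ (by simp [hk07] : k0 < ((List.range 7).map (pvBucket y_values dayweek n)).length)]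
        rw [pvSetMapRange 7 _ k0 hk07, List.getElem_map, List.getElem_range]
        apply List.map_congr_left
        intro k hk
        have hk7 : k < 7 := by simpa using List.mem_range.mp hk
        have hwk : pvWeekB.getD k "" = pvWeekB[k] := List.getD_eq_getElem pvWeekB "" (by simpa [pvWeekB] using hk7)
        by_cases hek : k = k0
        · subst hek
          simp only [pvBucket, htake, List.filter_append, List.map_append, hwk]
          have hbeq : (dayweek[n] == pvWeekB[k]) = true := by rw [beq_iff_eq]; exact hk0get.symm
          simp [hbeq]
        · have hne : dayweek[n] ≠ pvWeekB[k] := by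
            intro h
            apply hek
            have hnd : pvWeekB.Nodup := by decide
            exact hnd.getElem_inj_iff.mp (hk0get.trans h).symm
          simp only [if_neg hek, pvBucket, htake, List.filter_append, List.map_append, hwk]
          have hbeq : (dayweek[n] == pvWeekB[k]) = false := by rw [beq_eq_false_iff_ne]; exact hne
          simp [hbeq]
      · -- not a weekday: the buckets are unchanged and the new pair (if any) is filtered out everywhere
        have hcontains : pvWeekB.contains dayweek[n] = false := by simp [hmem]
        simp only [hcontains, Bool.false_eq_true, if_false]
        apply List.map_congr_left
        intro k hk
        have hk7 : k < 7 := by simpa using List.mem_range.mp hk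
        have hwkmem : pvWeekB.getD k "" ∈ pvWeekB := by
          rw [List.getD_eq_getElem pvWeekB "" (by simpa [pvWeekB] using hk7)]
          exact List.getElem_mem _
        have hne : dayweek[n] ≠ pvWeekB.getD k "" := fun h => hmem (h ▸ hwkmem)
        by_cases hy : n < y_values.length
        · have hlen : n < (pvPairs y_values dayweek).length := by
            simp [pvPairs, List.length_zip, List.length_take]; omega
          have htake : (pvPairs y_values dayweek).take (n + 1)
              = (pvPairs y_values dayweek).take n ++ [(dayweek[n], y_values[n])] := by
            rw [List.take_add_one, List.getElem?_eq_getElem hlen]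
            congr 1
            simp [pvPairs, List.getElem_zip, List.getElem_take]
          simp [pvBucket, htake, List.filter_append, -List.getD_eq_getElem?_getD, hne]
        · have htake : (pvPairs y_values dayweek).take (n + 1) = (pvPairs y_values dayweek).take n := by
            rw [List.take_add_one, List.getElem?_eq_none]
            · simp
            · simp [pvPairs, List.length_zip]; omega
          simp [pvBucket, htake]

-- ===== VERDICT (by name: the statement is the Claim_ definition above) =====
theorem weekproces_spec : Claim_equal_weekproces := by
  unfold Claim_equal_weekproces
  intro y_values dayweek _ hp
  unfold Spec_weekproces
  unfold weekproces weekproces_alt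
  have hle : (pvPairs y_values dayweek).length ≤ 7 := by
    simp [pvPairs, List.length_zip, List.length_take]
  have houter :
      pvWeekA.foldl
        (fun (acc : List String × List Int) member =>
          (PySem.List.pyRange 0 7 1).foldl
            (fun (acc : List String × List Int) i =>
              if PySem.List.pyGetD dayweek i "" == member then
                (acc.1 ++ [PySem.List.pyGetD dayweek i ""], acc.2 ++ [PySem.List.pyGetD y_values i 0])
              else acc) acc)
        ([], [])
      = pvWeekA.foldl
          (fun (acc : List String × List Int) member =>
            (acc.1 ++ ((pvPairs y_values dayweek).filter (fun p => p.1 == member)).map Prod.fst,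
             acc.2 ++ ((pvPairs y_values dayweek).filter (fun p => p.1 == member)).map Prod.snd))
          ([], []) := by
    apply PySem.List.foldl_congr_mem
    intro acc member hm
    have := pvInnerA y_values dayweek hp member hm 7 (le_refl 7) acc
    rw [show ((7:Nat):Int) = (7:Int) by norm_num] at this
    rw [this, List.take_of_length_le hle]
  have hbk := pvInnerB y_values dayweek hp 7 (le_refl 7)
  rw [show ((7:Nat):Int) = (7:Int) by norm_num] at hbk
  rw [houter, pvPairFold]
  dsimp only
  rw [hbk]
  have hbtake : ∀ k : Nat, pvBucket y_values dayweek 7 k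
      = ((pvPairs y_values dayweek).filter (fun p => p.1 == pvWeekB.getD k "")).map Prod.snd := by
    intro k
    rw [pvBucket, List.take_of_length_le hle]
  simp only [show List.range 7 = [0, 1, 2, 3, 4, 5, 6] from rfl, List.map_cons, List.map_nil,
    PySem.List.enumerate_cons, PySem.List.enumerate_nil, List.foldl_cons, List.foldl_nil,
    hbtake, PySem.List.pyRepeat_singleton]
  simp only [show pvWeekA = pvWeekB from rfl, pvWeekB]
  simp [pvFilterFstReplicate, List.length_map, PySem.List.pyGetD, PySem.List.pyGet?,
    PySem.List.pyIdx?]
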